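-- pv_equiv track=rewrite | github.com/epiGnosko/AdventOfCode | AOC2024/day2/sol2.py | issafe
-- ===== SOURCE A (Python) =====
-- def issafe(x):
--     mul = 1
--     if x[0] - x[1] < 0:
--         mul = -1
--     for i in range(len(x)-1):
--         if mul*(x[i] - x[i + 1]) > 3 or mul*(x[i] - x[i + 1]) < 1:
--             return False
--     return True
-- ===== SOURCE B (Python) =====
-- def issafe(x):
--     diffs = [b - a for a, b in zip(x, x[1:])]
--     return all(1 <= d <= 3 for d in diffs) or all(-3 <= d <= -1 for d in diffs)
-- ===== Notes on version B (the rewrite author's own statement) =====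
-- stated objective: idiomatic
-- what changed: Replaces the single-direction `mul` sign state with an index loop over x[i]/x[i+1] by a direction-free check: build the list of consecutive differences once and accept iff every difference is between 1 and 3 or every difference is between -3 and -1.
-- outside the precondition, e.g. on issafe([1]): A raises IndexError, B returns True; on issafe([7]): A raises IndexError, B returns True; on issafe([]): A raises IndexError, B returns True
import Mathlib
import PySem

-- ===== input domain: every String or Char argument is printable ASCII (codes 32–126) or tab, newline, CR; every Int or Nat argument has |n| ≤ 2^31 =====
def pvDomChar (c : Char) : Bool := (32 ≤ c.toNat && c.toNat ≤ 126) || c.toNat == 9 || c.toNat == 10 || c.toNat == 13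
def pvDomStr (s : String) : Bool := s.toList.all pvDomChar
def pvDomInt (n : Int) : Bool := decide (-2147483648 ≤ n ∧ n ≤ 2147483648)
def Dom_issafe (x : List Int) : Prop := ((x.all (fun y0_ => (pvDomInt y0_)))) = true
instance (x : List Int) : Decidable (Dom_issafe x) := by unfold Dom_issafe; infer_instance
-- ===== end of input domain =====

-- B replaces A's `mul` sign-state index loop by a direction-free check on the list of
-- consecutive differences (all between 1 and 3, or all between -3 and -1); objective: idiomatic.

-- ===== PORT A =====
-- x[0], x[1], x[i], x[i+1] are in range on Pre_ (2 ≤ length); pyGetD with default 0 is exact there.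
def issafe (x : List Int) : Bool :=
  let mul : Int :=
    if PySem.List.pyGetD x 0 0 - PySem.List.pyGetD x 1 0 < 0 then -1 else 1
  -- for i in range(len(x)-1): if bad then return False; return True
  (PySem.List.pyRange 0 ((x.length : Int) - 1) 1).all (fun i =>
    !(decide (mul * (PySem.List.pyGetD x i 0 - PySem.List.pyGetD x (i + 1) 0) > 3) ||
      decide (mul * (PySem.List.pyGetD x i 0 - PySem.List.pyGetD x (i + 1) 0) < 1)))

-- ===== PORT B =====
def issafe_alt (x : List Int) : Bool :=
  let diffs := (x.zip (PySem.List.slice x (some 1) none)).map (fun p => p.2 - p.1)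
  diffs.all (fun d => decide (1 ≤ d) && decide (d ≤ 3)) ||
  diffs.all (fun d => decide (-3 ≤ d) && decide (d ≤ -1))

-- ===== PRECONDITION & SPEC =====
-- Pre_ excludes exactly the inputs (length < 2) on which A raises IndexError at x[1].
def Pre_issafe (x : List Int) : Prop := 2 ≤ x.length
instance (x : List Int) : Decidable (Pre_issafe x) := by unfold Pre_issafe; infer_instance
def pvWitness_issafe : List Int := ([1, 2] : List Int)

def Spec_issafe (x : List Int) (out : Bool) : Prop := out = issafe_alt x
instance (x : List Int) (out : Bool) : Decidable (Spec_issafe x out) := by unfold Spec_issafe; infer_instance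

-- ===== CLAIM (what is proved, stated in full; the proofs are below) =====
def Claim_equal_issafe : Prop := ∀ (x : List Int), Dom_issafe x → Pre_issafe x → Spec_issafe x (issafe x)

-- ===== LEMMAS AND PROOFS =====

-- A's indexed loop over range(len(x)-1) viewed as a scan over consecutive pairs.
theorem range_all_pairs (x : List Int) (P : Int → Int → Bool) :
    (List.range (x.length - 1)).all (fun k => P (x.getD k 0) (x.getD (k + 1) 0))
      = (x.zip x.tail).all (fun p => P p.1 p.2) := by
  induction x with
  | nil => rfl
  | cons a t ih =>
    cases t with
    | nil => rfl
    | cons b t' =>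
      rw [show ((a :: b :: t').length - 1) = ((b :: t').length - 1) + 1 by simp,
        List.range_succ_eq_map]
      simp only [List.all_cons, List.all_map, List.zip_cons_cons, List.tail_cons,
        Function.comp_def, List.getD_cons_succ, List.getD_cons_zero]
      simp only [List.getD_cons_succ, List.tail_cons] at ih
      rw [ih]

-- A's loop body as a pair predicate, for either value of mul.
theorem issafe_eq_pairs (x : List Int) (h : 2 ≤ x.length) :
    issafe x =
      (x.zip x.tail).all (fun p =>
        let mul : Int := if x.getD 0 0 - x.getD 1 0 < 0 then -1 else 1
        !(decide (mul * (p.1 - p.2) > 3) || decide (mul * (p.1 - p.2) < 1))) := by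
  unfold issafe
  have hlen : ((x.length : Int) - 1) = ((x.length - 1 : Nat) : Int) := by omega
  rw [hlen, PySem.List.pyRange_zero_nat]
  simp only [List.all_map, PySem.List.pyGetD_zero, Function.comp_def]
  have h0 : PySem.List.pyGetD x (1 : Int) 0 = x.getD 1 0 := by
    have := PySem.List.pyGetD_natCast x (1 : Nat) 0; simp at this; exact this
  rw [h0]
  rw [← range_all_pairs x (fun u v =>
    let mul : Int := if x.getD 0 0 - x.getD 1 0 < 0 then -1 else 1
    !(decide (mul * (u - v) > 3) || decide (mul * (u - v) < 1)))]
  apply List.all_congr rfl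
  intro k
  have e1 : PySem.List.pyGetD x ((k : Int)) 0 = x.getD k 0 := by
    exact PySem.List.pyGetD_natCast x k 0
  have e2 : PySem.List.pyGetD x ((k : Int) + 1) 0 = x.getD (k + 1) 0 := by
    have := PySem.List.pyGetD_natCast x (k + 1) 0; push_cast at this; simpa using this
  simp only [e1, e2]

-- B over consecutive pairs.
theorem issafe_alt_eq_pairs (x : List Int) :
    issafe_alt x =
      ((x.zip x.tail).all (fun p => decide (1 ≤ p.2 - p.1) && decide (p.2 - p.1 ≤ 3)) ||
       (x.zip x.tail).all (fun p => decide (-3 ≤ p.2 - p.1) && decide (p.2 - p.1 ≤ -1))) := by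
  unfold issafe_alt
  rw [PySem.List.slice_from_one]
  simp only [List.all_map]
  rfl

-- ===== VERDICT (by name: the statement is the Claim_ definition above) =====
theorem issafe_spec : Claim_equal_issafe := by
  intro x _ hpre
  unfold Spec_issafe
  unfold Pre_issafe at hpre
  rw [issafe_eq_pairs x hpre, issafe_alt_eq_pairs x]
  obtain ⟨a, t, rfl⟩ : ∃ a t, x = a :: t := by
    cases x with
    | nil => simp at hpre
    | cons a t => exact ⟨a, t, rfl⟩
  obtain ⟨b, t', rfl⟩ : ∃ b t', t = b :: t' := by
    cases t with
    | nil => simp at hpre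
    | cons b t' => exact ⟨b, t', rfl⟩
  simp only [List.tail_cons, List.getD_cons_zero, List.getD_cons_succ]
  by_cases hab : a - b < 0
  · simp only [if_pos hab]
    have h2 : ((a :: b :: t').zip (b :: t')).all
        (fun p => decide (-3 ≤ p.2 - p.1) && decide (p.2 - p.1 ≤ -1)) = false := by
      rw [List.all_eq_false]
      exact ⟨(a, b), by simp [List.zip_cons_cons], by simp; omega⟩
    rw [h2, Bool.or_false]
    refine List.all_congr rfl (fun p => ?_)
    rw [Bool.eq_iff_iff]
    simp only [Bool.or_eq_false_iff, Bool.and_eq_true, Bool.not_eq_true', decide_eq_true_eq,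
      decide_eq_false_iff_not]
    omega
  · simp only [if_neg hab]
    have h1 : ((a :: b :: t').zip (b :: t')).all
        (fun p => decide (1 ≤ p.2 - p.1) && decide (p.2 - p.1 ≤ 3)) = false := by
      rw [List.all_eq_false]
      exact ⟨(a, b), by simp [List.zip_cons_cons], by simp; omega⟩
    rw [h1, Bool.false_or]
    refine List.all_congr rfl (fun p => ?_)
    rw [Bool.eq_iff_iff]
    simp only [Bool.or_eq_false_iff, Bool.and_eq_true, Bool.not_eq_true', decide_eq_true_eq,
      decide_eq_false_iff_not]
    omega
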